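-- pv_equiv track=rewrite | github.com/fmmazz/chatterbot | chatterbot-lfa/chat_script_parser.py | pop_content_given_a_simple_entry_type
-- ===== SOURCE A (Python) =====
-- def pop_content_given_a_simple_entry_type(list_of_content, entry_type):
--     """Pop the values which start with the entry type."""
--     result = []
--     i = 0
--     while i < len(list_of_content):
--         if list_of_content[i].startswith(entry_type):
--             content = list_of_content[i]
--             content = content.split(":", 1)[1]
--             content = content.strip()
--             result.append(content)
--             list_of_content.pop(i)
--         else:
--             i += 1
--     return result
-- ===== SOURCE B (Python) =====
-- def pop_content_given_a_simple_entry_type(list_of_content, entry_type):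
--     """Pop the values which start with the entry type."""
--     result = [s.split(":", 1)[1].strip()
--               for s in list_of_content if s.startswith(entry_type)]
--     list_of_content[:] = [s for s in list_of_content
--                           if not s.startswith(entry_type)]
--     return result
-- ===== Notes on version B (the rewrite author's own statement) =====
-- stated objective: alternative
-- what changed: Replaces the while-loop with repeated list.pop(i) by a single-pass comprehension partition (filter+map) plus one slice assignment for the in-place removal.
import Mathlib
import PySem

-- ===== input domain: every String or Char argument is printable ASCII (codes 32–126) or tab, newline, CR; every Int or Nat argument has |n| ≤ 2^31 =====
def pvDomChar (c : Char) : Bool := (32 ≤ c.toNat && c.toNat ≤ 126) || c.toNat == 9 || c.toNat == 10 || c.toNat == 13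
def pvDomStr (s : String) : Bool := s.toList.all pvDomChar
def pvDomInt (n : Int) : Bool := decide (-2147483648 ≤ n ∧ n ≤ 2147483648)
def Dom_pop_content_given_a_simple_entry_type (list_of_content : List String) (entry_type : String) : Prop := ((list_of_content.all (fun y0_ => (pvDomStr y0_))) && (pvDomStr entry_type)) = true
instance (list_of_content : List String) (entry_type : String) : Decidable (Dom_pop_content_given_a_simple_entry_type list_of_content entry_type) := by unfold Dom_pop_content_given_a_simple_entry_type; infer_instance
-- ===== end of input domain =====

-- B replaces A's while-loop with repeated list.pop(i) by a one-pass comprehension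
-- partition plus a slice assignment (an alternative decomposition); B performs the
-- same in-place mutation of list_of_content; the equivalence is about the RETURN value.

-- ===== PORT A =====
-- s.split(":", 1)[1].strip(); the [1] returns "" where Python raises (outside Pre_).
def pvExtractA (s : String) : String :=
  PySem.Str.strip ((PySem.List.pyGet? ((PySem.Str.splitMax? s ":" 1).getD []) 1).getD "")

-- the while loop: i advances only on a non-match; a match pops index i
def pvLoopA (entry_type : String) (xs : List String) (i : Nat) (result : List String) : List String :=
  if h : i < xs.length then
    if PySem.Str.startswith xs[i] entry_type then
      pvLoopA entry_type (xs.eraseIdx i) i (result ++ [pvExtractA xs[i]])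
    else
      pvLoopA entry_type xs (i + 1) result
  else result
termination_by xs.length - i
decreasing_by
  · simp only [List.length_eraseIdx, h, if_pos]; omega
  · omega

def pop_content_given_a_simple_entry_type (list_of_content : List String) (entry_type : String) : List String :=
  pvLoopA entry_type list_of_content 0 []

-- ===== PORT B =====
def pop_content_given_a_simple_entry_type_alt (list_of_content : List String) (entry_type : String) : List String :=
  (list_of_content.filter (fun s => PySem.Str.startswith s entry_type)).map
    (fun s => PySem.Str.strip ((PySem.List.pyGet? ((PySem.Str.splitMax? s ":" 1).getD []) 1).getD ""))

-- ===== PRECONDITION & SPEC =====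
-- A (and B) raise IndexError when an entry starting with entry_type has no ':';
-- Pre_ excludes exactly those inputs.
def Pre_pop_content_given_a_simple_entry_type (list_of_content : List String) (entry_type : String) : Prop :=
  ∀ s ∈ list_of_content, PySem.Str.startswith s entry_type = true → PySem.Str.isIn ":" s = true
instance (list_of_content : List String) (entry_type : String) : Decidable (Pre_pop_content_given_a_simple_entry_type list_of_content entry_type) := by unfold Pre_pop_content_given_a_simple_entry_type; infer_instance

def pvWitness_pop_content_given_a_simple_entry_type : List String × String := (["cmd: hi", "x", "cmd:yo"], "cmd")

def Spec_pop_content_given_a_simple_entry_type (list_of_content : List String) (entry_type : String) (out : List String) : Prop := out = pop_content_given_a_simple_entry_type_alt list_of_content entry_type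
instance (list_of_content : List String) (entry_type : String) (out : List String) : Decidable (Spec_pop_content_given_a_simple_entry_type list_of_content entry_type out) := by unfold Spec_pop_content_given_a_simple_entry_type; infer_instance

-- ===== CLAIM (what is proved, stated in full; the proofs are below) =====
def Claim_equal_pop_content_given_a_simple_entry_type : Prop := ∀ (list_of_content : List String) (entry_type : String), Dom_pop_content_given_a_simple_entry_type list_of_content entry_type → Pre_pop_content_given_a_simple_entry_type list_of_content entry_type → Spec_pop_content_given_a_simple_entry_type list_of_content entry_type (pop_content_given_a_simple_entry_type list_of_content entry_type)

-- ===== LEMMAS AND PROOFS =====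

-- the suffix of the list still to be inspected after erasing index i
theorem pv_drop_eraseIdx (xs : List String) (i : Nat) (h : i < xs.length) :
    (xs.eraseIdx i).drop i = xs.drop (i + 1) := by
  rw [List.eraseIdx_eq_take_drop_succ]
  have ht : (xs.take i).length = i := List.length_take_of_le (by omega)
  rw [List.drop_append_of_le_length (by omega), List.drop_of_length_le (le_of_eq ht)]
  simp

-- loop invariant: pvLoopA processes exactly the suffix from i as filter-then-map
theorem pv_loopA_eq (entry_type : String) : ∀ (n : Nat) (xs : List String) (i : Nat)
    (acc : List String), xs.length - i ≤ n →
    pvLoopA entry_type xs i acc =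
      acc ++ ((xs.drop i).filter (fun s => PySem.Str.startswith s entry_type)).map pvExtractA := by
  intro n
  induction n with
  | zero =>
    intro xs i acc hn
    rw [pvLoopA]
    have h1 : ¬ i < xs.length := by omega
    have h2 : xs.drop i = [] := List.drop_eq_nil_of_le (by omega)
    simp [h1, h2]
  | succ n ih =>
    intro xs i acc hn
    rw [pvLoopA]
    by_cases h : i < xs.length
    · have hd : xs.drop i = xs[i] :: xs.drop (i + 1) := List.drop_eq_getElem_cons h
      have hlen : (xs.eraseIdx i).length = xs.length - 1 := by
        simp only [List.length_eraseIdx, h, if_pos]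
      by_cases hp : PySem.Str.startswith xs[i] entry_type = true
      · simp only [h, dif_pos, hp, if_pos]
        rw [ih (xs.eraseIdx i) i (acc ++ [pvExtractA xs[i]]) (by rw [hlen]; omega)]
        rw [pv_drop_eraseIdx xs i h, hd, List.filter_cons, if_pos hp]
        simp
      · simp only [h, dif_pos, hp, if_neg, Bool.not_eq_true]
        rw [ih xs (i + 1) acc (by omega), hd, List.filter_cons, if_neg hp]
    · have h2 : xs.drop i = [] := List.drop_eq_nil_of_le (by omega)
      simp [h, h2]

-- ===== VERDICT (by name: the statement is the Claim_ definition above) =====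
theorem pop_content_given_a_simple_entry_type_spec : Claim_equal_pop_content_given_a_simple_entry_type := by
  intro list_of_content entry_type _ _
  unfold Spec_pop_content_given_a_simple_entry_type pop_content_given_a_simple_entry_type
    pop_content_given_a_simple_entry_type_alt
  rw [pv_loopA_eq entry_type list_of_content.length list_of_content 0 [] (by omega)]
  simp [pvExtractA]
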